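-- pv_equiv track=rewrite | github.com/JH201421228/TIL | self/202502/20250211/boj_28015/1st.py | drawing
-- ===== SOURCE A (Python) =====
-- from collections import deque
--
-- def drawing(L):
--     q = deque(L)
--     res = 0
--
--     while q:
--         cur = q[0]
--         while q and q[0] == cur:
--             q.popleft()
--
--         while q and q[-1] == cur:
--             q.pop()
--
--         res += 1
--
--     return res
-- ===== SOURCE B (Python) =====
-- def drawing(L):
--     # pass 1: run-compress (collapse consecutive duplicates)
--     runs = []
--     for x in L:
--         if not runs or runs[-1] != x:
--             runs.append(x)
--     # pass 2: two-pointer peel of the compressed list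
--     i, j = 0, len(runs) - 1
--     res = 0
--     while i <= j:
--         cur = runs[i]
--         i += 1
--         if i <= j and runs[j] == cur:
--             j -= 1
--         res += 1
--     return res
-- ===== Notes on version B (the rewrite author's own statement) =====
-- stated objective: alternative
-- what changed: A peels the raw list with a deque, interleaving per-segment front-run and back-run pops; B first run-compresses the list in one pass and then counts segments with a two-pointer (i, j) peel over the compressed list.
import Mathlib
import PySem

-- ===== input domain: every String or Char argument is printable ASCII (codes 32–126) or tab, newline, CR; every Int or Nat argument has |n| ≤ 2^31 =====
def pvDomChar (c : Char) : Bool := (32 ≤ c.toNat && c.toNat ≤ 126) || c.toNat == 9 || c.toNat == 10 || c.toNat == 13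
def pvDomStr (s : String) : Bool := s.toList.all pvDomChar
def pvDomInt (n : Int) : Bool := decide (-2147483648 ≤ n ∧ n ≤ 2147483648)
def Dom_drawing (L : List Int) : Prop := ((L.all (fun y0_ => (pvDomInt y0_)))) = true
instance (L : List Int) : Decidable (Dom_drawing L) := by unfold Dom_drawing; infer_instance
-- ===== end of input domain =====

-- B replaces A's interleaved deque peeling by a run-compression pass followed by a
-- two-pointer peel over the compressed list (objective: alternative decomposition).

-- ===== PORT A =====
-- 'while q and q[0] == cur: q.popleft()'
def dropWhileEq (c : Int) : List Int → List Int
  | [] => []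
  | x :: xs => if x = c then dropWhileEq c xs else x :: xs

theorem dropWhileEq_length_le (c : Int) (l : List Int) :
    (dropWhileEq c l).length ≤ l.length := by
  induction l with
  | nil => simp [dropWhileEq]
  | cons x xs ih =>
    simp only [dropWhileEq]
    split
    · exact le_trans ih (Nat.le_succ _)
    · simp

-- 'while q and q[-1] == cur: q.pop()': popping from the back is popping from the
-- front of the reversed deque; exact, one pop per step.
def dropBackEq (c : Int) (l : List Int) : List Int := (dropWhileEq c l.reverse).reverse

-- the outer 'while q: … res += 1' loop of A
def drawLoopA : List Int → Int → Int
  | [], res => res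
  | x :: xs, res => drawLoopA (dropBackEq x (dropWhileEq x (x :: xs))) (res + 1)
termination_by l _ => l.length
decreasing_by
  have h1 : (dropWhileEq x (x :: xs)).length ≤ xs.length := by
    simpa [dropWhileEq] using dropWhileEq_length_le x xs
  have h2 : (dropBackEq x (dropWhileEq x (x :: xs))).length ≤ (dropWhileEq x (x :: xs)).length := by
    simpa [dropBackEq] using dropWhileEq_length_le x (dropWhileEq x (x :: xs)).reverse
  simp only [List.length_cons]
  omega

def drawing (L : List Int) : Int := drawLoopA L 0

-- ===== PORT B =====
-- pass 1: 'for x in L: if not runs or runs[-1] != x: runs.append(x)'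
def compress (L : List Int) : List Int :=
  L.foldl (fun runs x =>
    if runs.isEmpty || decide (PySem.List.pyGetD runs (-1) 0 ≠ x) then runs ++ [x] else runs) []

-- pass 2: the 'while i <= j' two-pointer peel; runs[i]/runs[j] are always in range here
def peel (runs : List Int) (i j res : Int) : Int :=
  if i ≤ j then
    let cur := PySem.List.pyGetD runs i 0
    if i + 1 ≤ j ∧ PySem.List.pyGetD runs j 0 = cur then
      peel runs (i + 1) (j - 1) (res + 1)
    else
      peel runs (i + 1) j (res + 1)
  else res
termination_by (j + 1 - i).toNat
decreasing_by all_goals omega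

def drawing_alt (L : List Int) : Int :=
  let runs := compress L
  peel runs 0 ((runs.length : Int) - 1) 0

-- ===== PRECONDITION & SPEC =====
def Spec_drawing (L : List Int) (out : Int) : Prop := out = drawing_alt L
instance (L : List Int) (out : Int) : Decidable (Spec_drawing L out) := by unfold Spec_drawing; infer_instance

-- ===== CLAIM (what is proved, stated in full; the proofs are below) =====
def Claim_equal_drawing : Prop := ∀ (L : List Int), Dom_drawing L → Spec_drawing L (drawing L)

-- ===== LEMMAS AND PROOFS =====

-- run compression, parameterized by the previously kept element
def rcF : Option Int → List Int → List Int
  | _, [] => []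
  | o, x :: xs => if o = some x then rcF o xs else x :: rcF (some x) xs

-- abstract peel count on a (compressed) list
def N : List Int → Int
  | [] => 0
  | x :: xs => 1 + N (if xs.getLast? = some x then xs.dropLast else xs)
termination_by l => l.length
decreasing_by
  simp only [List.length_cons]
  split
  · simp only [List.length_dropLast]; omega
  · omega

-- structural version of dropBackEq
def db (c : Int) : List Int → List Int
  | [] => []
  | x :: xs => if x = c ∧ db c xs = [] then [] else x :: db c xs

theorem dropWhileEq_append_single (c a : Int) (u : List Int) :
    dropWhileEq c (u ++ [a]) =
      if dropWhileEq c u = [] then (if a = c then [] else [a]) else dropWhileEq c u ++ [a] := by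
  induction u with
  | nil => simp [dropWhileEq]
  | cons x xs ih =>
    simp only [List.cons_append, dropWhileEq]
    by_cases hx : x = c
    · simpa [hx] using ih
    · simp [hx]

theorem dropBackEq_eq_db (c : Int) (l : List Int) : dropBackEq c l = db c l := by
  induction l with
  | nil => simp [dropBackEq, dropWhileEq, db]
  | cons x xs ih =>
    have hrev : (x :: xs).reverse = xs.reverse ++ [x] := by simp
    unfold dropBackEq
    rw [hrev, dropWhileEq_append_single]
    by_cases he : dropWhileEq c xs.reverse = []
    · have hdb : db c xs = [] := by
        rw [← ih]; unfold dropBackEq; rw [he]; rfl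
      by_cases hx : x = c
      · simp [he, hx, db, hdb]
      · simp [he, hx, db, hdb]
    · have hdb : db c xs ≠ [] := by
        rw [← ih]; unfold dropBackEq; simpa using he
      have hx : ¬ (x = c ∧ db c xs = []) := by tauto
      simp only [if_neg he, db, if_neg hx, List.reverse_append, List.reverse_cons,
        List.reverse_nil, List.nil_append, List.cons_append]
      rw [← ih]; rfl

theorem rcF_none_dropWhileEq (c : Int) (l : List Int) :
    rcF none (dropWhileEq c l) = rcF (some c) l := by
  induction l with
  | nil => rfl
  | cons x xs ih =>
    by_cases hx : x = c
    · subst hx; simpa [dropWhileEq, rcF] using ih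
    · simp [dropWhileEq, hx, rcF, Ne.symm hx]

theorem rcF_nil_of_db_nil (c : Int) (l : List Int) (h : db c l = []) :
    rcF (some c) l = [] := by
  induction l with
  | nil => rfl
  | cons x xs ih =>
    unfold db at h
    by_cases hc : x = c ∧ db c xs = []
    · obtain ⟨hx, hd⟩ := hc
      subst hx
      simpa [rcF] using ih hd
    · simp [hc] at h

theorem db_nil_of_rcF_nil (c : Int) (l : List Int) (h : rcF (some c) l = []) :
    db c l = [] := by
  induction l with
  | nil => rfl
  | cons x xs ih =>
    unfold rcF at h
    by_cases hx : (some c : Option Int) = some x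
    · have hx' : c = x := by simpa using hx
      rw [if_pos hx] at h
      subst hx'
      have := ih h
      simp [db, this]
    · rw [if_neg hx] at h
      simp at h

theorem rcF_db (o : Option Int) (c : Int) (l : List Int) :
    rcF o (db c l) =
      if (rcF o l).getLast? = some c then (rcF o l).dropLast else rcF o l := by
  induction l generalizing o with
  | nil => simp [db, rcF]
  | cons x xs ih =>
    by_cases hc : x = c ∧ db c xs = []
    · obtain ⟨hx, hd⟩ := hc
      subst hx
      have hr : rcF (some x) xs = [] := rcF_nil_of_db_nil x xs hd
      have hdbc : db x (x :: xs) = [] := by simp [db, hd]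
      rw [hdbc]
      by_cases ho : o = some x
      · simp [rcF, ho, hr]
      · simp [rcF, ho, hr]
    · have hdbc : db c (x :: xs) = x :: db c xs := by simp [db, hc]
      rw [hdbc]
      by_cases ho : o = some x
      · -- head absorbed on both sides
        simp only [rcF, if_pos ho]
        exact ih o
      · simp only [rcF, if_neg ho]
        rw [ih (some x)]
        have hnil : rcF (some x) xs = [] → x ≠ c := by
          intro hrn hxc
          subst hxc
          exact hc ⟨rfl, db_nil_of_rcF_nil x xs hrn⟩
        generalize ht : rcF (some x) xs = t
        rcases t with _ | ⟨y, ts⟩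
        · have hx : x ≠ c := hnil ht
          simp [hx]
        · have h1 : (x :: y :: ts).getLast? = (y :: ts).getLast? := by
            simp [List.getLast?_cons_cons]
          by_cases hg : (y :: ts).getLast? = some c
          · simp [h1, hg]
          · simp [h1, hg]

theorem drawLoopA_eq (n : Nat) :
    ∀ (l : List Int), l.length ≤ n → ∀ res, drawLoopA l res = res + N (rcF none l) := by
  induction n with
  | zero =>
    intro l hl res
    have : l = [] := List.eq_nil_of_length_eq_zero (Nat.le_zero.mp hl)
    subst this
    simp [drawLoopA, rcF, N]
  | succ n ih =>
    intro l hl res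
    match l with
    | [] => simp [drawLoopA, rcF, N]
    | x :: xs =>
      rw [drawLoopA]
      have hdw : dropWhileEq x (x :: xs) = dropWhileEq x xs := by simp [dropWhileEq]
      have hlen : (dropBackEq x (dropWhileEq x (x :: xs))).length ≤ n := by
        have h1 : (dropWhileEq x (x :: xs)).length ≤ xs.length := by
          simpa [dropWhileEq] using dropWhileEq_length_le x xs
        have h2 : (dropBackEq x (dropWhileEq x (x :: xs))).length ≤ (dropWhileEq x (x :: xs)).length := by
          simpa [dropBackEq] using dropWhileEq_length_le x (dropWhileEq x (x :: xs)).reverse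
        simp only [List.length_cons] at hl
        omega
      rw [ih _ hlen]
      have hr : rcF none (dropBackEq x (dropWhileEq x (x :: xs))) =
          (if (rcF (some x) xs).getLast? = some x then (rcF (some x) xs).dropLast
           else rcF (some x) xs) := by
        rw [hdw, dropBackEq_eq_db, rcF_db, rcF_none_dropWhileEq]
      rw [hr]
      have hrc : rcF none (x :: xs) = x :: rcF (some x) xs := by simp [rcF]
      rw [hrc, N]
      ring

theorem compress_eq_rcF_aux :
    ∀ (l acc : List Int),
      l.foldl (fun runs x =>
        if runs.isEmpty || decide (PySem.List.pyGetD runs (-1) 0 ≠ x) then runs ++ [x] else runs) acc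
        = acc ++ rcF acc.getLast? l := by
  intro l
  induction l with
  | nil => intro acc; simp [rcF]
  | cons x xs ih =>
    intro acc
    rw [List.foldl_cons]
    rcases acc with _ | ⟨a, as⟩
    · have h0 : ([] : List Int) ++ [x] = [x] := rfl
      simp only [List.isEmpty_nil, Bool.true_or, if_pos, h0]
      rw [ih [x]]
      simp [rcF]
    · have hne : (a :: as) ≠ [] := by simp
      have hget : PySem.List.pyGetD (a :: as) (-1) 0 = (a :: as).getLast hne :=
        PySem.List.pyGetD_neg_one (a :: as) 0 hne
      have hglast : (a :: as).getLast? = some ((a :: as).getLast hne) :=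
        List.getLast?_eq_some_getLast hne
      by_cases hx : (a :: as).getLast hne = x
      · have : ((a :: as).isEmpty || decide (PySem.List.pyGetD (a :: as) (-1) 0 ≠ x)) = false := by
          simp [hget, hx]
        rw [this]
        rw [if_neg (by simp)]
        rw [ih (a :: as)]
        have hstep : rcF (a :: as).getLast? (x :: xs) = rcF (a :: as).getLast? xs := by
          simp only [rcF]
          rw [if_pos (by rw [hglast, hx])]
        rw [hstep]
      · have : ((a :: as).isEmpty || decide (PySem.List.pyGetD (a :: as) (-1) 0 ≠ x)) = true := by
          simp [hget, hx]
        rw [this, if_pos rfl]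
        rw [ih ((a :: as) ++ [x])]
        have hg2 : ((a :: as) ++ [x]).getLast? = some x := List.getLast?_concat
        rw [hg2]
        have hstep : rcF (a :: as).getLast? (x :: xs) = x :: rcF (some x) xs := by
          simp only [rcF]
          rw [if_neg (by rw [hglast]; simpa using hx)]
        rw [hstep, List.append_assoc]
        rfl

theorem compress_eq_rcF (L : List Int) : compress L = rcF none L := by
  unfold compress
  simpa using compress_eq_rcF_aux L []

theorem peel_eq (runs : List Int) :
    ∀ (k : Nat) (i j res : Int), 0 ≤ i → j < (runs.length : Int) → (j + 1 - i).toNat ≤ k →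
      peel runs i j res = res + N ((runs.drop i.toNat).take (j + 1 - i).toNat) := by
  intro k
  induction k with
  | zero =>
    intro i j res hi hj hk
    have hij : ¬ i ≤ j := by omega
    rw [peel, if_neg hij]
    have : (j + 1 - i).toNat = 0 := by omega
    simp [this, N]
  | succ k ih =>
    intro i j res hi hj hk
    by_cases hij : i ≤ j
    · have hilt : i.toNat < runs.length := by omega
      have hjlt : j.toNat < runs.length := by omega
      have hcur : PySem.List.pyGetD runs i 0 = runs[i.toNat] :=
        PySem.List.pyGetD_eq_getElem runs 0 hi (by omega)
      have hcurj : PySem.List.pyGetD runs j 0 = runs[j.toNat] :=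
        PySem.List.pyGetD_eq_getElem runs 0 (by omega) (by omega)
      -- split the slice: head is runs[i]
      have hdrop : runs.drop i.toNat = runs[i.toNat] :: runs.drop (i.toNat + 1) :=
        List.drop_eq_getElem_cons hilt
      have htake : (runs.drop i.toNat).take (j + 1 - i).toNat =
          runs[i.toNat] :: (runs.drop (i.toNat + 1)).take (j - i).toNat := by
        rw [hdrop]
        have h1 : (j + 1 - i).toNat = (j - i).toNat + 1 := by omega
        rw [h1, List.take_succ_cons]
      set rest := (runs.drop (i.toNat + 1)).take (j - i).toNat with hrest
      have hrestlen : rest.length = (j - i).toNat := by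
        rw [hrest]
        simp only [List.length_take, List.length_drop]
        omega
      have hrest_last : i + 1 ≤ j → rest.getLast? = some runs[j.toNat] := by
        intro h1j
        have hlpos : 0 < rest.length := by omega
        rw [List.getLast?_eq_getElem?, hrestlen, hrest,
          List.getElem?_take_of_lt (by omega), List.getElem?_drop]
        have hidx : i.toNat + 1 + ((j - i).toNat - 1) = j.toNat := by omega
        rw [hidx, List.getElem?_eq_getElem hjlt]
      rw [peel, if_pos hij]
      simp only [hcur, hcurj]
      by_cases hb : i + 1 ≤ j ∧ runs[j.toNat] = runs[i.toNat]
      · rw [if_pos hb]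
        rw [ih (i + 1) (j - 1) (res + 1) (by omega) (by omega) (by omega)]
        have hifpos : (if rest.getLast? = some runs[i.toNat] then rest.dropLast else rest)
            = rest.dropLast := by
          rw [if_pos (by rw [hrest_last hb.1, hb.2])]
        have hdl : rest.dropLast = (runs.drop (i.toNat + 1)).take (j - 1 + 1 - (i + 1)).toNat := by
          rw [List.dropLast_eq_take, hrestlen, hrest, List.take_take]
          congr 1
          omega
        rw [htake, N, hifpos, hdl]
        have : (i + 1).toNat = i.toNat + 1 := by omega
        rw [this]
        ring
      · rw [if_neg hb]
        rw [ih (i + 1) j (res + 1) (by omega) hj (by omega)]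
        have hifneg : (if rest.getLast? = some runs[i.toNat] then rest.dropLast else rest)
            = rest := by
          rcases Decidable.em (i + 1 ≤ j) with h1j | h1j
          · rw [if_neg]
            rw [hrest_last h1j]
            intro hcontra
            exact hb ⟨h1j, by injection hcontra⟩
          · have : rest = [] := by
              have : rest.length = 0 := by omega
              exact List.eq_nil_of_length_eq_zero this
            simp [this]
        have hrest' : (runs.drop (i + 1).toNat).take (j + 1 - (i + 1)).toNat = rest := by
          rw [hrest]
          congr 1
          · omega
          · congr 1
            omega
        rw [htake, N, hifneg, hrest']
        ring
    · rw [peel, if_neg hij]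
      have : (j + 1 - i).toNat = 0 := by omega
      simp [this, N]

theorem drawing_alt_eq (L : List Int) : drawing_alt L = N (rcF none L) := by
  unfold drawing_alt
  set runs := compress L with hruns
  rw [peel_eq runs (((runs.length : Int) - 1) + 1 - 0).toNat 0 ((runs.length : Int) - 1) 0
    (by omega) (by omega) (by omega)]
  have h1 : (((runs.length : Int) - 1) + 1 - 0).toNat = runs.length := by omega
  rw [h1]
  simp [compress_eq_rcF L, hruns]

-- ===== VERDICT (by name: the statement is the Claim_ definition above) =====
theorem drawing_spec : Claim_equal_drawing := by
  intro L _
  unfold Spec_drawing drawing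
  rw [drawLoopA_eq L.length L le_rfl 0, drawing_alt_eq]
  ring
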